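-- pv_equiv track=rewrite | github.com/Alard06/work | 2.py | optimal_sparkle
-- ===== SOURCE A (Python) =====
-- def optimal_sparkle(c1, b1):
--     sparkling_hours = 0
--     remaining_fires = c1
--
--     while remaining_fires >= 1:
--         sparkling_hours += 2
--         remaining_fires -= 1
--         if remaining_fires > 0:
--             sparkling_hours += (2 * b1)
--
--     return sparkling_hours
-- ===== SOURCE B (Python) =====
-- def optimal_sparkle(c1, b1):
--     # closed form: each of c1 fires gives 2 hours; between consecutive fires, 2*b1 hours
--     if c1 < 1:
--         return 0
--     return 2 * c1 + 2 * b1 * (c1 - 1)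
-- ===== Notes on version B (the rewrite author's own statement) =====
-- stated objective: faster
-- what changed: replaces the countdown loop by a closed-form arithmetic formula 2*c1 + 2*b1*(c1-1) (0 for c1 < 1)
import Mathlib
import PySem

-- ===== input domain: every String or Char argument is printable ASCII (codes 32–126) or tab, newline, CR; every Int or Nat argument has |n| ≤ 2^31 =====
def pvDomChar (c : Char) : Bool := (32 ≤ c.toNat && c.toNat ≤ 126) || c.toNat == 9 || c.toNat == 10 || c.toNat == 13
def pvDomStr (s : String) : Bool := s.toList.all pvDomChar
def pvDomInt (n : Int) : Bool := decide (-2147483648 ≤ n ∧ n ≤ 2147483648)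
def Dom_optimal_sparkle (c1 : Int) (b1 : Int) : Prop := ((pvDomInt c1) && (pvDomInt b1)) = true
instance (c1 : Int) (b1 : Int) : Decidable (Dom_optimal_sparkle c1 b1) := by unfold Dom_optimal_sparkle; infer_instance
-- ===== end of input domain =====

-- B replaces A's countdown loop by a closed-form formula (objective: faster, O(1) vs O(c1)).


-- ===== PORT A =====
-- the while loop of A: state (sparkling_hours, remaining_fires)
def sparkleLoop (b1 : Int) (sparkling : Int) (remaining : Int) : Int :=
  if h : remaining ≥ 1 then
    let s := sparkling + 2
    let r := remaining - 1
    sparkleLoop b1 (if r > 0 then s + 2 * b1 else s) r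
  else
    sparkling
termination_by remaining.toNat
decreasing_by omega

def optimal_sparkle (c1 : Int) (b1 : Int) : Int :=
  sparkleLoop b1 0 c1

-- ===== PORT B =====
def optimal_sparkle_alt (c1 : Int) (b1 : Int) : Int :=
  if c1 < 1 then 0 else 2 * c1 + 2 * b1 * (c1 - 1)

-- ===== PRECONDITION & SPEC =====
def Spec_optimal_sparkle (c1 : Int) (b1 : Int) (out : Int) : Prop := out = optimal_sparkle_alt c1 b1
instance (c1 : Int) (b1 : Int) (out : Int) : Decidable (Spec_optimal_sparkle c1 b1 out) := by unfold Spec_optimal_sparkle; infer_instance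

-- ===== CLAIM (what is proved, stated in full; the proofs are below) =====
def Claim_equal_optimal_sparkle : Prop := ∀ (c1 : Int) (b1 : Int), Dom_optimal_sparkle c1 b1 → Spec_optimal_sparkle c1 b1 (optimal_sparkle c1 b1)

-- ===== LEMMAS AND PROOFS =====
theorem sparkleLoop_closed (b1 : Int) (n : ℕ) :
    ∀ (s r : Int), r.toNat = n →
      sparkleLoop b1 s r = if r < 1 then s else s + 2 * r + 2 * b1 * (r - 1) := by
  induction n with
  | zero =>
    intro s r hr
    rw [sparkleLoop.eq_def]
    have : ¬ r ≥ 1 := by omega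
    simp [this]
  | succ k ih =>
    intro s r hr
    rw [sparkleLoop.eq_def]
    have hge : r ≥ 1 := by omega
    simp only [hge, dif_pos]
    rw [ih _ (r - 1) (by omega)]
    by_cases h1 : r - 1 > 0 <;> simp only [h1, if_pos, if_false] <;> split_ifs <;> try omega
    · ring
    · have : r = 1 := by omega
      subst this; ring

-- ===== VERDICT (by name: the statement is the Claim_ definition above) =====
theorem optimal_sparkle_spec : Claim_equal_optimal_sparkle := by
  intro c1 b1 _
  unfold Spec_optimal_sparkle optimal_sparkle optimal_sparkle_alt
  rw [sparkleLoop_closed b1 c1.toNat 0 c1 rfl]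
  split_ifs with h1
  · omega
  · ring
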